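-- pv_equiv track=rewrite | github.com/celadevra/ParaJumper | parajumper/indices.py | _get_freq
-- ===== SOURCE A (Python) =====
-- def _get_freq(word_list):
--     """Get number of occurrence of word in a list."""
--     counts = dict()
--     for word in word_list:
--         if word in counts:
--             counts[word] += 1
--         else:
--             counts[word] = 1
--
--     results = []
--     for word in counts:
--         results.append((counts[word], word))
--     results.sort()
--     return results
-- ===== SOURCE B (Python) =====
-- def _get_freq(word_list):
--     """Get number of occurrence of word in a list."""
--     ordered = sorted(word_list)
--     results = []
--     i = 0
--     n = len(ordered)
--     while i < n:
--         j = i + 1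
--         while j < n and ordered[j] == ordered[i]:
--             j += 1
--         results.append((j - i, ordered[i]))
--         i = j
--     results.sort()
--     return results
-- ===== Notes on version B (the rewrite author's own statement) =====
-- stated objective: alternative
-- what changed: Replaced the dict-accumulation pass with sort-then-group: sort the words, walk the sorted sequence counting runs of equal adjacent words to build the (count, word) tuples, then sort those tuples as A does; no dict is maintained at all.
import Mathlib
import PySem

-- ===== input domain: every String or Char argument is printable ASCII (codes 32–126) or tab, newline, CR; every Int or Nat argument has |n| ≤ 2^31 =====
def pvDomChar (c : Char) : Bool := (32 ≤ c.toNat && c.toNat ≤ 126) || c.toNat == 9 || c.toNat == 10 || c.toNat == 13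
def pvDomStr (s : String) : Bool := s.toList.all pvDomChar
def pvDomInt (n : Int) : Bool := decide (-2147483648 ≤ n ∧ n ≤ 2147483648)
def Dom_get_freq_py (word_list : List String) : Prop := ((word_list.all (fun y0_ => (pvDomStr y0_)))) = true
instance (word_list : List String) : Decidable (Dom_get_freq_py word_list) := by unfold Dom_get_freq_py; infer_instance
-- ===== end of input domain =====

-- B replaces A's dict-accumulation with sort-then-group: sort the words, count runs of
-- equal adjacent words to build the (count, word) tuples, then sort those tuples as A does.


-- ===== PORT A =====
def get_freq_py (word_list : List String) : List (Int × String) :=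
  let counts : PySem.Dict String Int :=
    word_list.foldl (fun d word =>
      if d.contains word then d.insert word (d.getD word 0 + 1)
      else d.insert word 1) PySem.Dict.empty
  let results : List (Int × String) :=
    counts.keys.foldl (fun acc word => acc ++ [(counts.getD word 0, word)]) []
  PySem.List.sorted2 results (fun p => p.1) (fun p => p.2) false

-- ===== PORT B =====
-- B's inner while loop scans the run of words equal to ordered[i]; ported as
-- run-splitting recursion: takeWhile is the inner scan, dropWhile the jump i := j.
def groupRuns : List String → List (Int × String)
  | [] => []
  | x :: xs =>
    (((xs.takeWhile (fun y => y == x)).length : Int) + 1, x)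
      :: groupRuns (xs.dropWhile (fun y => y == x))
  termination_by s => s.length
  decreasing_by
    simp only [List.length_cons]
    exact Nat.lt_succ_of_le (List.Sublist.length_le (List.dropWhile_sublist _))

def get_freq_py_alt (word_list : List String) : List (Int × String) :=
  let ordered := PySem.List.sorted word_list (fun w => w) false
  let results := groupRuns ordered
  PySem.List.sorted2 results (fun p => p.1) (fun p => p.2) false

-- ===== SPEC/CLAIM =====
def Spec_get_freq_py (word_list : List String) (out : List (Int × String)) : Prop := out = get_freq_py_alt word_list
instance (word_list : List String) (out : List (Int × String)) : Decidable (Spec_get_freq_py word_list out) := by unfold Spec_get_freq_py; infer_instance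
def Claim_equal_get_freq_py : Prop := ∀ (word_list : List String), Dom_get_freq_py word_list → Spec_get_freq_py word_list (get_freq_py word_list)

-- ===== LEMMAS =====
-- A's counting loop is collections.Counter
lemma fold_eq_counter (wl : List String) :
    wl.foldl (fun d word =>
      if d.contains word then d.insert word (d.getD word 0 + 1)
      else d.insert word 1) PySem.Dict.empty = PySem.Dict.counter wl := by
  rw [← PySem.Dict.foldl_insert_getD_add_one_eq_counter]
  apply PySem.List.foldl_congr_mem
  intro d w _
  by_cases h : d.contains w
  · simp [h]
  · have h0 : d.getD w 0 = 0 := PySem.Dict.getD_of_not_contains d 0 (by simpa using h)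
    simp [h, h0]

-- sorting pairs is sorting by the lexicographic key
lemma sorted2_eq_sorted_lex (xs : List (Int × String)) :
    PySem.List.sorted2 xs (fun p => p.1) (fun p => p.2) false
      = PySem.List.sorted xs (fun p => (toLex p : Lex (Int × String))) false := by
  rw [PySem.List.sorted_eq_foldl_insertBy]
  have hbefore : (fun (a b : Int × String) => decide (a.1 < b.1) || (!decide (b.1 < a.1) && decide (a.2 < b.2)))
      = (fun (a b : Int × String) => decide ((toLex a : Lex (Int × String)) < toLex b)) := by
    funext a b
    by_cases h1 : a.1 < b.1
    · simp [Prod.Lex.toLex_lt_toLex, h1]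
    · by_cases h2 : b.1 < a.1
      · simp [Prod.Lex.toLex_lt_toLex, h1, h2, ne_of_gt h2]
      · have he : a.1 = b.1 := le_antisymm (not_lt.mp h2) (not_lt.mp h1)
        simp [Prod.Lex.toLex_lt_toLex, he]
  simp only [PySem.List.sorted2, if_neg (by decide : ¬ (false = true))]
  rw [hbefore]

-- Set.add into an accumulator headed by an element not in the rest commutes
lemma foldl_add_cons_of_not_mem (x : String) :
    ∀ (r acc : List String), x ∉ r →
      r.foldl PySem.Set.add (x :: acc) = x :: r.foldl PySem.Set.add acc := by
  intro r
  induction r with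
  | nil => intro acc _; rfl
  | cons y r ih =>
    intro acc hx
    have hyx : y ≠ x := fun h => hx (h ▸ List.mem_cons_self)
    have : PySem.Set.add (x :: acc) y = x :: PySem.Set.add acc y := by
      simp only [PySem.Set.add, PySem.Set.contains]
      by_cases hm : y ∈ acc <;> simp [hm, hyx]
    simp only [List.foldl_cons, this]
    exact ih _ (fun h => hx (List.mem_cons_of_mem _ h))

-- elements already present do not change the set
lemma foldl_add_of_all_mem (t acc : List String) (h : ∀ y ∈ t, y ∈ acc) :
    t.foldl PySem.Set.add acc = acc := by
  induction t with
  | nil => rfl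
  | cons y t ih =>
    have hy : PySem.Set.add acc y = acc := by
      have hmem := h y List.mem_cons_self
      simp [PySem.Set.add, PySem.Set.contains, hmem]
    simp only [List.foldl_cons, hy]
    exact ih (fun z hz => h z (List.mem_cons_of_mem _ hz))

-- after dropping the leading run of x, nothing equals x any more (list is sorted)
lemma dropWhile_ne (x : String) : ∀ (xs : List String), (∀ y ∈ xs, x ≤ y) → xs.Pairwise (· ≤ ·) →
    ∀ z ∈ xs.dropWhile (fun y => y == x), z ≠ x := by
  intro xs
  induction xs with
  | nil => intro _ _ z hz; simp at hz
  | cons y ys ih =>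
    intro hle hp z hz
    by_cases hy : (y == x) = true
    · rw [List.dropWhile_cons, if_pos hy] at hz
      exact ih (fun u hu => hle u (List.mem_cons_of_mem _ hu)) (List.pairwise_cons.mp hp).2 z hz
    · rw [List.dropWhile_cons, if_neg hy] at hz
      have hyx : y ≠ x := by simpa using hy
      have hxy : x < y := lt_of_le_of_ne (hle y List.mem_cons_self) (Ne.symm hyx)
      rcases List.mem_cons.mp hz with h | h
      · subst h; exact Ne.symm (ne_of_lt hxy)
      · have : y ≤ z := (List.pairwise_cons.mp hp).1 z h
        exact Ne.symm (ne_of_lt (lt_of_lt_of_le hxy this))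

-- run-length grouping of a ≤-sorted list is dedup + count
lemma groupRuns_eq (s : List String) (hs : s.Pairwise (· ≤ ·)) :
    groupRuns s = (PySem.List.dedup s).map (fun w => ((List.count w s : Int), w)) := by
  induction s using groupRuns.induct with
  | case1 => simp [groupRuns, PySem.List.dedup, PySem.Set.ofList]
  | case2 x xs ih =>
    have hx : ∀ y ∈ xs, x ≤ y := by
      intro y hy; exact (List.pairwise_cons.mp hs).1 y hy
    have hxs : xs.Pairwise (· ≤ ·) := (List.pairwise_cons.mp hs).2
    set t := xs.takeWhile (fun y => y == x) with ht
    set r := xs.dropWhile (fun y => y == x) with hr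
    have hsplit : t ++ r = xs := List.takeWhile_append_dropWhile
    have htx : ∀ y ∈ t, y = x := fun y hy => by
      have := List.mem_takeWhile_imp hy; simpa using this
    have hrx : ∀ z ∈ r, z ≠ x := by
      rw [hr]; exact dropWhile_ne x xs hx hxs
    have hxnr : x ∉ r := fun h => hrx x h rfl
    -- dedup (x :: xs) = x :: dedup r
    have hdedup : PySem.List.dedup (x :: xs) = x :: PySem.List.dedup r := by
      rw [PySem.List.dedup, PySem.Set.ofList_eq_foldl]
      have : (x :: xs).foldl PySem.Set.add [] = xs.foldl PySem.Set.add [x] := by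
        simp [PySem.Set.add, PySem.Set.contains]
      rw [this, ← hsplit, List.foldl_append]
      have h1 : t.foldl PySem.Set.add [x] = [x] :=
        foldl_add_of_all_mem t [x] (fun y hy => by rw [htx y hy]; exact List.mem_cons_self)
      rw [h1, foldl_add_cons_of_not_mem x r [] hxnr]
      simp [PySem.List.dedup, PySem.Set.ofList_eq_foldl]
    -- counts
    have hcx : List.count x (x :: xs) = t.length + 1 := by
      rw [← hsplit]
      have h1 : List.count x t = t.length := List.count_eq_length.mpr (fun y hy => (htx y hy).symm)
      have h2 : List.count x r = 0 := List.count_eq_zero.mpr hxnr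
      simp [List.count_append, h1, h2]
    have hcr : ∀ w ∈ r, List.count w (x :: xs) = List.count w r := by
      intro w hw
      have hwx : w ≠ x := hrx w hw
      have hwt : List.count w t = 0 := List.count_eq_zero.mpr (fun h => hwx (htx w h))
      rw [← hsplit]
      simp [List.count_append, hwt, Ne.symm hwx]
    have hpr : r.Pairwise (· ≤ ·) := hxs.sublist (List.dropWhile_sublist _)
    rw [groupRuns, hdedup, List.map_cons, ih hpr]
    congr 1
    · rw [hcx]; norm_num; exact (congrArg List.length ht).symm
    · apply List.map_congr_left
      intro w hw
      rw [hcr w ((PySem.List.mem_dedup _ _).mp hw)]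

theorem get_freq_main (wl : List String) : get_freq_py wl = get_freq_py_alt wl := by
  unfold get_freq_py get_freq_py_alt
  simp only [fold_eq_counter]
  rw [PySem.List.foldl_append_singleton_eq_map, List.nil_append, PySem.Dict.keys_counter]
  have hsortpw : (PySem.List.sorted wl (fun w => w) false).Pairwise (· ≤ ·) := by
    simpa using PySem.List.sorted_pairwise wl (fun w => w)
  rw [groupRuns_eq _ hsortpw]
  rw [sorted2_eq_sorted_lex, sorted2_eq_sorted_lex]
  apply PySem.List.sorted_eq_sorted_of_perm _ _ _ toLex.injective
  have hA : ((PySem.Set.ofList wl).map (fun w => ((PySem.Dict.counter wl).getD w 0, w)))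
      = (PySem.Set.ofList wl).map (fun w => ((List.count w wl : Int), w)) := by
    apply List.map_congr_left; intro w _
    rw [PySem.Dict.getD_counter]
  rw [hA]
  have hps : (PySem.List.sorted wl (fun w => w) false).Perm wl := PySem.List.sorted_perm wl (fun w => w) false
  have h1 : (PySem.List.dedup (PySem.List.sorted wl (fun w => w) false)).map
        (fun w => ((List.count w (PySem.List.sorted wl (fun w => w) false) : Int), w))
      = (PySem.List.dedup (PySem.List.sorted wl (fun w => w) false)).map
        (fun w => ((List.count w wl : Int), w)) := by
    apply List.map_congr_left; intro w _
    rw [hps.count_eq]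
  rw [h1]
  have hdperm : (PySem.List.dedup (PySem.List.sorted wl (fun w => w) false)).Perm (PySem.List.dedup wl) := by
    rw [List.perm_ext_iff_of_nodup (PySem.List.nodup_dedup _) (PySem.List.nodup_dedup _)]
    intro a
    rw [PySem.List.mem_dedup, PySem.List.mem_dedup]
    exact hps.mem_iff
  have := (hdperm.map (fun w => ((List.count w wl : Int), w))).symm
  simpa [PySem.List.dedup_eq_ofList] using this

theorem get_freq_py_spec : Claim_equal_get_freq_py := by
  intro wl _
  exact get_freq_main wl
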